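-- pv_equiv track=rewrite | github.com/pablo-a/expert-system | parser.py | split_operator
-- ===== SOURCE A (Python) =====
-- def split_operator(operator, token):
--     splitted = []
--     tokens = token.split(operator)
--     for token in tokens[:-1]:
--         if token != "":
--             splitted.append(token)
--         splitted.append(operator)
--     if tokens[-1] != "":
--         splitted.append(tokens[-1])
--     return splitted
-- ===== SOURCE B (Python) =====
-- def split_operator(operator, token):
--     if operator == "":
--         raise ValueError("empty separator")
--     result = []
--     buf = []
--     i = 0
--     n = len(token)
--     m = len(operator)
--     while i < n:
--         if token.startswith(operator, i):
--             if buf: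
--                 result.append("".join(buf))
--                 buf = []
--             result.append(operator)
--             i += m
--         else:
--             buf.append(token[i])
--             i += 1
--     if buf:
--         result.append("".join(buf))
--     return result
-- ===== Notes on version B (the rewrite author's own statement) =====
-- stated objective: alternative
-- what changed: A splits the string with str.split and then interleaves the operator back between the pieces in a second pass; B is a single-pass tokenizer that walks the string once, flushing a character buffer and emitting the operator whenever the operator matches at the current position.
import Mathlib
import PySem

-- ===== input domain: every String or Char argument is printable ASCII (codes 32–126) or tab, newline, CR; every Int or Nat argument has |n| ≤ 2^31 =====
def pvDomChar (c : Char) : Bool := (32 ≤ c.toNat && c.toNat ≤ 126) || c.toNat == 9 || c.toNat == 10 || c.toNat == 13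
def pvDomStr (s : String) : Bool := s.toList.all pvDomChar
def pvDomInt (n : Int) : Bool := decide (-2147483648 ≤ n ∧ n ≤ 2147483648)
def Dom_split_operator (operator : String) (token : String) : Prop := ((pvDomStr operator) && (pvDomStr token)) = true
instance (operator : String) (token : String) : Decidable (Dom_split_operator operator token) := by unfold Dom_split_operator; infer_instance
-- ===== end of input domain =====

-- B replaces A's split-then-interleave with a single left-to-right scan keeping a character
-- buffer (objective: alternative decomposition, same cost).

-- ===== PORT A =====
def split_operator (operator : String) (token : String) : List String :=
  match PySem.Str.split? token operator with
  | none => []   -- Python raises ValueError here (empty separator); excluded by Pre_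
  | some tokens =>
      -- for token in tokens[:-1]: if token != "": append token; append operator
      let splitted := (PySem.List.slice tokens none (some (-1))).foldl
        (fun acc t => (if t ≠ "" then acc ++ [t] else acc) ++ [operator]) []
      -- if tokens[-1] != "": append tokens[-1]
      match PySem.List.pyGet? tokens (-1) with
      | none => splitted   -- unreachable: str.split always returns a nonempty list
      | some last => if last ≠ "" then splitted ++ [last] else splitted

-- ===== PORT B =====
-- the while-loop of Source B: remaining suffix of the token, character buffer, result so far
def split_operator_altGo (op : List Char) : List Char → List Char → List (List Char) → List (List Char)
  | [], buf, res => if buf ≠ [] then res ++ [buf] else res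
  | c :: rest, buf, res =>
      -- the 'op ≠ []' conjunct only makes the recursion total; Source B has already raised on ""
      if h : op.isPrefixOf (c :: rest) ∧ op ≠ [] then
        split_operator_altGo op ((c :: rest).drop op.length) []
          ((if buf ≠ [] then res ++ [buf] else res) ++ [op])
      else
        split_operator_altGo op rest (buf ++ [c]) res
termination_by s _ _ => s.length
decreasing_by
  · have : 1 ≤ op.length := by
      cases op with
      | nil => exact absurd rfl h.2
      | cons a t => simp
    simp only [List.length_drop, List.length_cons]
    omega
  · simp

def split_operator_alt (operator : String) (token : String) : List String :=
  if operator = "" then []   -- Python B raises ValueError here; excluded by Pre_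
  else (split_operator_altGo operator.toList token.toList [] []).map String.ofList

-- ===== PRECONDITION & SPEC =====
-- operator = "" makes both Pythons raise ValueError (str.split rejects an empty separator)
def Pre_split_operator (operator : String) (token : String) : Prop := operator ≠ ""
instance (operator : String) (token : String) : Decidable (Pre_split_operator operator token) := by
  unfold Pre_split_operator; infer_instance

def pvWitness_split_operator : String × String := ("+", "a+b")

def Spec_split_operator (operator : String) (token : String) (out : List String) : Prop := out = split_operator_alt operator token
instance (operator : String) (token : String) (out : List String) : Decidable (Spec_split_operator operator token out) := by unfold Spec_split_operator; infer_instance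

-- ===== CLAIM (what is proved, stated in full; the proofs are below) =====
def Claim_equal_split_operator : Prop := ∀ (operator : String) (token : String), Dom_split_operator operator token → Pre_split_operator operator token → Spec_split_operator operator token (split_operator operator token)

-- ===== LEMMAS AND PROOFS =====

-- natural recursion computing Python's token.split(operator) for operator ≠ ""
def splitRec (op : List Char) : List Char → List (List Char)
  | [] => [[]]
  | c :: rest =>
      if h : op.isPrefixOf (c :: rest) ∧ op ≠ [] then
        [] :: splitRec op ((c :: rest).drop op.length)
      else
        match splitRec op rest with
        | [] => [[c]]
        | t :: ts => (c :: t) :: ts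
termination_by s => s.length
decreasing_by
  · have : 1 ≤ op.length := by
      cases op with
      | nil => exact absurd rfl h.2
      | cons a t => simp
    simp only [List.length_drop, List.length_cons]
    omega
  · simp

-- prepend a buffer to the first piece
def consHead (buf : List Char) : List (List Char) → List (List Char)
  | [] => [buf]
  | t :: ts => (buf ++ t) :: ts

-- A's assembly pass, as a recursion over the pieces (char level / string level)
def interleave (op : List Char) : List (List Char) → List (List Char)
  | [] => []
  | [t] => if t ≠ [] then [t] else []
  | t :: ts => (if t ≠ [] then [t] else []) ++ op :: interleave op ts

def interleaveS (op : String) : List String → List String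
  | [] => []
  | [t] => if t ≠ "" then [t] else []
  | t :: ts => (if t ≠ "" then [t] else []) ++ op :: interleaveS op ts

theorem splitRec_ne_nil (op : List Char) (s : List Char) : splitRec op s ≠ [] := by
  cases s with
  | nil => simp [splitRec]
  | cons c rest =>
      rw [splitRec]
      split
      · simp
      · split <;> simp

theorem consHead_nil_of_ne_nil (ts : List (List Char)) (h : ts ≠ []) : consHead [] ts = ts := by
  cases ts with
  | nil => exact absurd rfl h
  | cons t ts => simp [consHead]

theorem consHead_consHead (a b : List Char) (ts : List (List Char)) :
    consHead a (consHead b ts) = consHead (a ++ b) ts := by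
  cases ts <;> simp [consHead]

theorem go_eq_splitRec (op : List Char) (hop : op ≠ []) :
    ∀ (fuel : Nat) (l cur : List Char) (acc : List (List Char)), l.length ≤ fuel →
      PySem.Chars.splitOn.go op fuel l cur acc = acc.reverse ++ consHead cur.reverse (splitRec op l) := by
  intro fuel
  induction fuel with
  | zero =>
      intro l cur acc hf
      have hl : l = [] := by
        cases l with
        | nil => rfl
        | cons c r => simp at hf
      subst hl
      rw [PySem.Chars.splitOn.go.eq_1]
      simp [splitRec, consHead]
  | succ fuel ih =>
      intro l cur acc hf
      cases l with
      | nil =>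
          rw [PySem.Chars.splitOn.go.eq_2 op (fuel+1) cur acc (by omega)]
          simp [splitRec, consHead]
      | cons c rest =>
          rw [PySem.Chars.splitOn.go.eq_3]
          have hop1 : 1 ≤ op.length := by
            cases op with
            | nil => exact absurd rfl hop
            | cons a t => simp
          by_cases hp : op.isPrefixOf (c :: rest) = true
          · rw [if_pos hp]
            have hlen : (List.drop op.length (c :: rest)).length ≤ fuel := by
              simp only [List.length_drop, List.length_cons]
              simp only [List.length_cons] at hf
              omega
            rw [ih _ _ _ hlen]
            rw [splitRec]
            rw [dif_pos ⟨hp, hop⟩]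
            rw [show ([] : List Char).reverse = [] from rfl,
                consHead_nil_of_ne_nil _ (splitRec_ne_nil _ _)]
            simp [consHead]
          · rw [if_neg hp]
            have hlen : rest.length ≤ fuel := by
              simp only [List.length_cons] at hf; omega
            rw [ih _ _ _ hlen]
            conv_rhs => rw [splitRec]
            rw [dif_neg (by simp [hp])]
            rcases h : splitRec op rest with _ | ⟨t, ts⟩
            · exact absurd h (splitRec_ne_nil _ _)
            · simp [consHead]

theorem splitOn_eq_splitRec (op : List Char) (hop : op ≠ []) (s : List Char) :
    PySem.Chars.splitOn s op = splitRec op s := by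
  rw [PySem.Chars.splitOn]
  rw [go_eq_splitRec op hop (s.length + 1) s [] [] (by omega)]
  rw [show ([] : List Char).reverse = [] from rfl]
  rw [consHead_nil_of_ne_nil _ (splitRec_ne_nil _ _)]
  simp

theorem altGo_eq (op : List Char) (hop : op ≠ []) :
    ∀ (s buf : List Char) (res : List (List Char)),
      split_operator_altGo op s buf res = res ++ interleave op (consHead buf (splitRec op s)) := by
  intro s buf res
  induction s, buf, res using split_operator_altGo.induct op with
  | case1 buf res h =>
      rw [split_operator_altGo]
      simp [splitRec, consHead, interleave, h]
  | case2 buf res h =>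
      rw [split_operator_altGo]
      simp at h
      simp [splitRec, consHead, interleave, h]
  | case3 c rest buf res h ih =>
      rw [split_operator_altGo, dif_pos h]
      simp only [dite_eq_ite] at ih
      rw [ih]
      conv_rhs => rw [splitRec]
      rw [dif_pos h]
      rw [show ((consHead [] (splitRec op (List.drop op.length (c :: rest)))) : List (List Char)) = splitRec op (List.drop op.length (c :: rest)) from
        consHead_nil_of_ne_nil _ (splitRec_ne_nil _ _)]
      rcases hs : splitRec op (List.drop op.length (c :: rest)) with _ | ⟨t, ts⟩
      · exact absurd hs (splitRec_ne_nil _ _)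
      · by_cases hb : buf = [] <;> simp [consHead, interleave, hb]
  | case4 c rest buf res h ih =>
      rw [split_operator_altGo, dif_neg h, ih]
      conv_rhs => rw [splitRec]
      rw [dif_neg h]
      rcases hs : splitRec op rest with _ | ⟨t, ts⟩
      · exact absurd hs (splitRec_ne_nil _ _)
      · have hm : (match (t :: ts : List (List Char)) with
              | [] => [[c]]
              | t :: ts => (c :: t) :: ts) = consHead [c] (t :: ts) := by simp [consHead]
        rw [hm, consHead_consHead]

theorem interleave_map (op : List Char) (ls : List (List Char)) :
    (interleave op ls).map String.ofList = interleaveS (String.ofList op) (ls.map String.ofList) := by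
  induction ls with
  | nil => simp [interleave, interleaveS]
  | cons t ts ih =>
      cases ts with
      | nil =>
          by_cases h : t = [] <;>
            simp [interleave, interleaveS, h]
      | cons u us =>
          rw [show interleave op (t :: u :: us) = (if t ≠ [] then [t] else []) ++ op :: interleave op (u :: us) from rfl]
          rw [show (t :: u :: us).map String.ofList = String.ofList t :: (u :: us).map String.ofList from rfl]
          rw [show interleaveS (String.ofList op) (String.ofList t :: (u :: us).map String.ofList) =
              (if String.ofList t ≠ "" then [String.ofList t] else []) ++ String.ofList op :: interleaveS (String.ofList op) ((u :: us).map String.ofList) from rfl]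
          rw [← ih]
          by_cases h : t = [] <;> simp [h]

theorem a_body_eq (op : String) :
    ∀ (ts : List String) (acc : List String) (h : ts ≠ []),
      (ts.dropLast.foldl (fun acc t => (if t ≠ "" then acc ++ [t] else acc) ++ [op]) acc)
        ++ (if ts.getLast h ≠ "" then [ts.getLast h] else [])
      = acc ++ interleaveS op ts := by
  intro ts
  induction ts with
  | nil => intro acc h; exact absurd rfl h
  | cons t ts ih =>
      intro acc h
      cases ts with
      | nil =>
          by_cases he : t = "" <;> simp [interleaveS, he]
      | cons u us =>
          rw [show (t :: u :: us).dropLast = t :: (u :: us).dropLast from rfl]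
          rw [show (t :: u :: us).getLast h = (u :: us).getLast (by simp) from List.getLast_cons _]
          rw [List.foldl_cons]
          rw [ih ((if t ≠ "" then acc ++ [t] else acc) ++ [op]) (by simp)]
          rw [show interleaveS op (t :: u :: us) = (if t ≠ "" then [t] else []) ++ op :: interleaveS op (u :: us) from rfl]
          by_cases he : t = "" <;> simp [he]

theorem split_eq_alt (operator token : String) (hop : operator ≠ "") :
    split_operator operator token = split_operator_alt operator token := by
  have hop' : operator.toList ≠ [] := by
    intro h
    exact hop (by have := congrArg String.ofList h; simpa using this)
  have hsplit : PySem.Str.split? token operator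
      = some ((splitRec operator.toList token.toList).map String.ofList) := by
    rw [PySem.Str.split?]
    rw [PySem.Chars.split?]
    rw [if_neg (by simpa using hop')]
    rw [splitOn_eq_splitRec _ hop']
    rfl
  simp only [split_operator, hsplit]
  rw [split_operator_alt, if_neg hop]
  rw [altGo_eq _ hop']
  rw [consHead_nil_of_ne_nil _ (splitRec_ne_nil _ _)]
  rw [List.nil_append]
  rw [interleave_map]
  have hofl : String.ofList operator.toList = operator := by
    simp
  rw [hofl]
  set tokens := (splitRec operator.toList token.toList).map String.ofList with htk
  have htne : tokens ≠ [] := by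
    simp [htk, splitRec_ne_nil]
  rw [PySem.List.slice_to_neg_one, PySem.List.pyGet?_neg_one]
  rw [List.getLast?_eq_some_getLast (h := htne)]
  have := a_body_eq operator tokens [] htne
  by_cases he : tokens.getLast htne = "" <;>
    simpa [he] using this

-- ===== VERDICT (by name: the statement is the Claim_ definition above) =====
theorem split_operator_spec : Claim_equal_split_operator := by
  intro operator token _ hpre
  unfold Spec_split_operator
  exact split_eq_alt operator token hpre
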